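-- pv_equiv track=rewrite | github.com/jturinetti/AdventOfCode_2021 | 3/problem.py | countbitsatindex
-- ===== SOURCE A (Python) =====
-- def countbitsatindex(data, index, determiner):
--     count = 0
--     bin1arr, bin0arr = [], []
--     for b in data:
--         if b[index] == '1':
--             count = count + 1
--             bin1arr.append(b)
--         else:
--             bin0arr.append(b)
--
--     halfwaypoint = len(data) / 2
--
--     if count >= halfwaypoint:
--         if determiner == 'most': return bin1arr
--         else: return bin0arr
--     else:
--         if determiner == 'most': return bin0arr
--         else: return bin1arr
-- ===== SOURCE B (Python) =====
-- def countbitsatindex(data, index, determiner):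
--     count = sum(1 for b in data if b[index] == '1')
--     keep_ones = (count >= len(data) / 2) == (determiner == 'most')
--     return [b for b in data if (b[index] == '1') == keep_ones]
-- ===== Notes on version B (the rewrite author's own statement) =====
-- stated objective: simpler
-- what changed: B replaces A's single-pass dual-accumulator partition with a count pass plus a boolean keep_ones derived from the most/least-vs-threshold case split, then one filtering comprehension building only the returned list.
import Mathlib
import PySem

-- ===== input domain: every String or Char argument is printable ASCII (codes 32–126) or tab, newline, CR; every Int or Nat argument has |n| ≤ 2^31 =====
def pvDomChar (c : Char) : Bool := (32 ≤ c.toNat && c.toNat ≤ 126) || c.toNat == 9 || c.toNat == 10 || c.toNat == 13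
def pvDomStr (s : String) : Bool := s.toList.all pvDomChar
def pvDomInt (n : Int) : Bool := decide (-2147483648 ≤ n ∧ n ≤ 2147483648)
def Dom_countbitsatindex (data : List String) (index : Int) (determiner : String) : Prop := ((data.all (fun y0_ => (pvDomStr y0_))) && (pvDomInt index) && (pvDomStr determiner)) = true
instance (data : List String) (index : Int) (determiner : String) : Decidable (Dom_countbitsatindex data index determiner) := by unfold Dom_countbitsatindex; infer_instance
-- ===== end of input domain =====

-- B replaces A's single-pass dual-accumulator partition by a count pass, a derived keep_ones
-- boolean, and one filtering pass building only the returned list (objective: simpler).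

-- ===== PORT A =====
-- A's loop: one fold over data carrying (count, bin1arr, bin0arr); b[index] is
-- PySem.Str.pyGet? (none = IndexError, excluded by Pre_; the none case takes the else branch,
-- which is irrelevant under Pre_). 'count >= len(data)/2' is ints vs an exact float len/2,
-- ported exactly as 2*count ≥ len.
def countbitsatindex (data : List String) (index : Int) (determiner : String) : List String :=
  let st := data.foldl
    (fun (s : Int × List String × List String) b =>
      if PySem.Str.pyGet? b index = some '1' then (s.1 + 1, s.2.1 ++ [b], s.2.2)
      else (s.1, s.2.1, s.2.2 ++ [b]))
    (0, [], [])
  if 2 * st.1 ≥ (data.length : Int) then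
    if determiner = "most" then st.2.1 else st.2.2
  else
    if determiner = "most" then st.2.2 else st.2.1

-- ===== PORT B =====
def countbitsatindex_alt (data : List String) (index : Int) (determiner : String) : List String :=
  let count : Int := data.foldl
    (fun a b => if PySem.Str.pyGet? b index = some '1' then a + 1 else a) 0
  let keepOnes : Bool := (decide (2 * count ≥ (data.length : Int))) == (determiner == "most")
  data.filter (fun b => (decide (PySem.Str.pyGet? b index = some '1')) == keepOnes)

-- ===== PRECONDITION & SPEC =====
-- Pre_: Python A raises IndexError on any b with index out of range; exactly those inputs are excluded.
def Pre_countbitsatindex (data : List String) (index : Int) (determiner : String) : Prop :=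
  ∀ b ∈ data, PySem.Raise.InRange b.toList.length index

instance (data : List String) (index : Int) (determiner : String) : Decidable (Pre_countbitsatindex data index determiner) := by unfold Pre_countbitsatindex; infer_instance

def pvWitness_countbitsatindex : List String × Int × String := (["10", "01", "11"], 0, "most")

def Spec_countbitsatindex (data : List String) (index : Int) (determiner : String) (out : List String) : Prop := out = countbitsatindex_alt data index determiner
instance (data : List String) (index : Int) (determiner : String) (out : List String) : Decidable (Spec_countbitsatindex data index determiner out) := by unfold Spec_countbitsatindex; infer_instance

-- ===== CLAIM (what is proved, stated in full; the proofs are below) =====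
def Claim_equal_countbitsatindex : Prop := ∀ (data : List String) (index : Int) (determiner : String), Dom_countbitsatindex data index determiner → Pre_countbitsatindex data index determiner → Spec_countbitsatindex data index determiner (countbitsatindex data index determiner)

-- ===== LEMMAS AND PROOFS =====

-- A's partition fold, characterised: count, kept list and rejected list are a count and two filters.
theorem pvFoldA (p : String → Prop) [DecidablePred p] :
    ∀ (l : List String) (c : Int) (xs ys : List String),
      l.foldl
        (fun (s : Int × List String × List String) b =>
          if p b then (s.1 + 1, s.2.1 ++ [b], s.2.2) else (s.1, s.2.1, s.2.2 ++ [b]))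
        (c, xs, ys)
      = (c + ((l.filter (fun b => decide (p b))).length : Int),
         xs ++ l.filter (fun b => decide (p b)),
         ys ++ l.filter (fun b => !decide (p b)))
  | [], c, xs, ys => by simp
  | b :: l, c, xs, ys => by
    by_cases h : p b
    · rw [List.foldl_cons, if_pos h, pvFoldA p l]
      simp [h, Prod.ext_iff]
      omega
    · rw [List.foldl_cons, if_neg h, pvFoldA p l]
      simp [h]

-- B's counting fold equals the filter length.
theorem pvFoldB (p : String → Prop) [DecidablePred p] :
    ∀ (l : List String) (c : Int),
      l.foldl (fun a b => if p b then a + 1 else a) c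
      = c + ((l.filter (fun b => decide (p b))).length : Int)
  | [], c => by simp
  | b :: l, c => by
    by_cases h : p b <;>
      simp [pvFoldB p l, h, add_assoc, add_comm]

-- ===== VERDICT (by name: the statement is the Claim_ definition above) =====
theorem countbitsatindex_spec : Claim_equal_countbitsatindex := by
  intro data index determiner _ _
  unfold Spec_countbitsatindex countbitsatindex countbitsatindex_alt
  rw [pvFoldA (fun b => PySem.Str.pyGet? b index = some '1') data 0 [] []]
  rw [pvFoldB (fun b => PySem.Str.pyGet? b index = some '1') data 0]
  simp only [List.nil_append, zero_add]
  simp only [ge_iff_le, PySem.Str.pyGet?]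
  have h2 : (determiner == "most") = decide (determiner = "most") := rfl
  split_ifs with hc hd hd <;>
    · simp only [PySem.Chars.pyGet?] at hc
      simp [h2, hd, hc]
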